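-- pv_equiv track=rewrite | github.com/dubicube/AnonymousEirbot | src/main.py | getBestAlarm
-- ===== SOURCE A (Python) =====
-- def getBestAlarm(alarm_list):
--     best_alarm = None
--     a = None
--     for (id, r) in alarm_list:
--         if r!=None and (best_alarm==None or a>r):
--             best_alarm = (id, r)
--             a = r
--     return best_alarm
-- ===== SOURCE B (Python) =====
-- def getBestAlarm(alarm_list):
--     valid = [(id, r) for (id, r) in alarm_list if r is not None]
--     ranked = sorted(valid, key=lambda p: p[1])
--     return ranked[0] if ranked else None
-- ===== Notes on version B (the rewrite author's own statement) =====
-- stated objective: alternative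
-- what changed: Replaced A's single-pass running-minimum loop with two tracked state variables by a filter pass followed by a stable sort on r and taking the first ranked element (stability preserves A's first-wins tie behaviour).
import Mathlib
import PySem

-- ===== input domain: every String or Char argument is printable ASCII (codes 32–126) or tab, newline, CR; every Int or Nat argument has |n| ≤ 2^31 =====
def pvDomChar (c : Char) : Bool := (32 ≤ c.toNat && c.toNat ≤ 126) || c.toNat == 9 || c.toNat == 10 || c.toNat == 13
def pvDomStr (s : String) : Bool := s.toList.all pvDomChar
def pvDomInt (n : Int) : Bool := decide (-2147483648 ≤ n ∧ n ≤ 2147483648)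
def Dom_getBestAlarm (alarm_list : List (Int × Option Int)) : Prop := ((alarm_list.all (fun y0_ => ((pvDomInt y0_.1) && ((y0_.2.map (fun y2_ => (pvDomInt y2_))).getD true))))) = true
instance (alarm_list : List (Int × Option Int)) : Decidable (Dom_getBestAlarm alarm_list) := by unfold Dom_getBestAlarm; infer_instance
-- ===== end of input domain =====

-- B replaces A's running-minimum loop by filter-out-None, stable sort on r, take the
-- first ranked element (stability preserves A's first-wins ties): alternative algorithm.

-- ===== PORT A =====
-- A's loop carries two variables: best_alarm and a (the current best r); pvStepA is one loop iteration.
def pvStepA (st : Option (Int × Int) × Option Int) (p : Int × Option Int) :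
    Option (Int × Int) × Option Int :=
  match p.2 with
  | none => st
  | some r =>
    match st.1, st.2 with
    | none, _ => (some (p.1, r), some r)
    | some _, none => st          -- unreachable: a is none only while best_alarm is none
    | some b, some a => if a > r then (some (p.1, r), some r) else (some b, some a)

def getBestAlarm (alarm_list : List (Int × Option Int)) : Option (Int × Int) :=
  (alarm_list.foldl pvStepA (none, none)).1

-- ===== PORT B =====
-- Source B: keep pairs with r not None, stable-sort by r, return the first element (None if empty)
def getBestAlarm_alt (alarm_list : List (Int × Option Int)) : Option (Int × Int) :=
  let valid := alarm_list.filterMap (fun p => p.2.map (fun r => (p.1, r)))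
  let ranked := PySem.List.sorted valid (fun p => p.2)
  ranked.head?

-- ===== PRECONDITION & SPEC =====
def Spec_getBestAlarm (alarm_list : List (Int × Option Int)) (out : Option (Int × Int)) : Prop := out = getBestAlarm_alt alarm_list
instance (alarm_list : List (Int × Option Int)) (out : Option (Int × Int)) : Decidable (Spec_getBestAlarm alarm_list out) := by unfold Spec_getBestAlarm; infer_instance

-- ===== CLAIM (what is proved, stated in full; the proofs are below) =====
def Claim_equal_getBestAlarm : Prop := ∀ (alarm_list : List (Int × Option Int)), Dom_getBestAlarm alarm_list → Spec_getBestAlarm alarm_list (getBestAlarm alarm_list)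

-- ===== LEMMAS AND PROOFS =====

-- A's fold from a well-formed state (a = best.map snd) equals the first-minimum of the
-- filtered suffix preceded by the current best (b.toList seeds min?'s accumulator with b).
theorem getBestAlarm_loop_eq (l : List (Int × Option Int)) (b : Option (Int × Int)) :
    (l.foldl pvStepA (b, b.map Prod.snd)).1 =
    PySem.List.min? (b.toList ++ l.filterMap (fun p => p.2.map (fun r => (p.1, r))))
      (fun p => p.2) := by
  induction l generalizing b with
  | nil =>
    cases b <;> simp [PySem.List.min?]
  | cons p t ih =>
    cases hr : p.2 with
    | none =>
      simpa [List.foldl, hr, pvStepA] using ih b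
    | some r =>
      cases b with
      | none =>
        simpa [List.foldl, hr, pvStepA] using ih (some (p.1, r))
      | some m =>
        by_cases h : m.2 > r
        · have h' : r < m.2 := h
          have step : PySem.List.min?
              (m :: (p.1, r) :: t.filterMap (fun p => p.2.map (fun r => (p.1, r))))
              (fun p : Int × Int => p.2) =
              PySem.List.min? ((p.1, r) :: t.filterMap (fun p => p.2.map (fun r => (p.1, r))))
              (fun p : Int × Int => p.2) := by
            simp [PySem.List.min?, List.foldl, h']
          simp only [List.foldl, List.filterMap_cons, hr, pvStepA, Option.map_some,
            Option.toList_some, List.cons_append, List.nil_append, if_pos h]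
          rw [step]
          simpa using ih (some (p.1, r))
        · have h' : ¬ r < m.2 := h
          have step : PySem.List.min?
              (m :: (p.1, r) :: t.filterMap (fun p => p.2.map (fun r => (p.1, r))))
              (fun p : Int × Int => p.2) =
              PySem.List.min? (m :: t.filterMap (fun p => p.2.map (fun r => (p.1, r))))
              (fun p : Int × Int => p.2) := by
            simp [PySem.List.min?, List.foldl, h']
          simp only [List.foldl, List.filterMap_cons, hr, pvStepA, Option.map_some,
            Option.toList_some, List.cons_append, List.nil_append, if_neg h]
          rw [step]
          simpa using ih (some m)

-- head? of one insertion step equals one running-minimum step on head?.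
theorem head?_insertBy (x : Int × Int) (ys : List (Int × Int)) :
    (PySem.List.insertBy (fun a b => decide (a.2 < b.2)) x ys).head? =
    match ys.head? with
    | none => some x
    | some y => if x.2 < y.2 then some x else some y := by
  cases ys with
  | nil => simp [PySem.List.insertBy]
  | cons y t => by_cases h : x.2 < y.2 <;> simp [PySem.List.insertBy, h]

-- The insertion-sort fold, viewed through head?, is exactly the running-minimum fold.
theorem head?_foldl_insertBy (xs acc : List (Int × Int)) :
    (xs.foldl (fun acc x =>
        PySem.List.insertBy (fun a b => decide (a.2 < b.2)) x acc) acc).head? =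
    xs.foldl (fun st x =>
        match st with
        | none => some x
        | some m => if x.2 < m.2 then some x else some m) acc.head? := by
  induction xs generalizing acc with
  | nil => rfl
  | cons x t ih =>
    simp only [List.foldl]
    rw [ih, head?_insertBy]

-- The first element of the stable sort by r is the first minimum by r.
theorem head?_sorted_eq_min? (xs : List (Int × Int)) :
    (PySem.List.sorted xs (fun p => p.2)).head? = PySem.List.min? xs (fun p => p.2) := by
  have hmin : PySem.List.min? xs (fun p => p.2) =
      xs.foldl (fun st x =>
        match st with
        | none => some x
        | some m => if x.2 < m.2 then some x else some m) none := by
    unfold PySem.List.min?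
    congr 1
    funext st x
    cases st <;> rfl
  rw [hmin]
  exact head?_foldl_insertBy xs []

-- ===== VERDICT (by name: the statement is the Claim_ definition above) =====
theorem getBestAlarm_spec : Claim_equal_getBestAlarm := by
  intro alarm_list _
  unfold Spec_getBestAlarm getBestAlarm getBestAlarm_alt
  rw [head?_sorted_eq_min?]
  simpa using getBestAlarm_loop_eq alarm_list none
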